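-- pv_equiv track=rewrite | github.com/brokenbartender/GEMOP | scripts/skill_bridge.py | _first_paragraph_after_title
-- ===== SOURCE A (Python) =====
-- def _first_paragraph_after_title(text: str) -> str:
--     lines = (text or "").splitlines()
--     if not lines:
--         return ""
--     i = 0
--     # Skip leading empties
--     while i < len(lines) and not lines[i].strip():
--         i += 1
--     # Skip a markdown title line if present
--     if i < len(lines) and lines[i].lstrip().startswith("#"):
--         i += 1
--     # Skip empties after title
--     while i < len(lines) and not lines[i].strip():
--         i += 1
--     # Take until blank line
--     out: list[str] = []
--     while i < len(lines):
--         line = lines[i].strip()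
--         if not line:
--             break
--         out.append(line)
--         i += 1
--     return " ".join(out).strip()
-- ===== SOURCE B (Python) =====
-- def _first_paragraph_after_title(text: str) -> str:
--     blocks = []
--     cur = []
--     for line in (text or "").splitlines():
--         if line.strip():
--             cur.append(line)
--         elif cur:
--             blocks.append(cur)
--             cur = []
--     if cur:
--         blocks.append(cur)
--     if not blocks:
--         return ""
--     first = blocks[0]
--     if first[0].lstrip().startswith("#"):
--         body = first[1:]
--         para = body if body else (blocks[1] if len(blocks) > 1 else [])
--     else:
--         para = first
--     return " ".join(l.strip() for l in para).strip()
-- ===== Notes on version B (the rewrite author's own statement) =====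
-- stated objective: alternative
-- what changed: A walks an index through four sequential while-loops (skip blanks, skip title, skip blanks, collect); B instead groups the lines into paragraph blocks in one pass and then selects the paragraph from the first one or two blocks.
import Mathlib
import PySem

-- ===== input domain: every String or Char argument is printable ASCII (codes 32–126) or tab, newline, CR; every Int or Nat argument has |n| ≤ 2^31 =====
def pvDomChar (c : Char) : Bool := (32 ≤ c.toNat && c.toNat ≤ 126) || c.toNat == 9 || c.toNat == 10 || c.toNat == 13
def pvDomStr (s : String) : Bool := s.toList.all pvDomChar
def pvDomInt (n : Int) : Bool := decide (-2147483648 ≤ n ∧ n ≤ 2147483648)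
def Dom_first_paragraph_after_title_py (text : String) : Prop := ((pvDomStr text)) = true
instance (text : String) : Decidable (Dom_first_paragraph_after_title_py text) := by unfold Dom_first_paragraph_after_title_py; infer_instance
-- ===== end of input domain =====

-- B re-decomposes A's four index-walking while loops into one grouping pass into paragraph
-- blocks plus a block selection; same result, objective: alternative decomposition.

-- ===== PORT A =====
-- A's two 'skip blank lines' while loops, as recursion on the remaining line suffix
def aSkipBlank : List String → List String
  | [] => []
  | l :: rest => if PySem.Str.strip l = "" then aSkipBlank rest else l :: rest

-- A's final 'take until blank line' while loop (appends the stripped lines)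
def aTakeOut : List String → List String
  | [] => []
  | l :: rest =>
    if PySem.Str.strip l = "" then [] else PySem.Str.strip l :: aTakeOut rest

def first_paragraph_after_title_py (text : String) : String :=
  let lines := PySem.Str.splitlines text
  if lines = [] then ""
  else
    let ls1 := aSkipBlank lines
    let ls2 := match ls1 with
      | l :: rest => if PySem.Str.startswith (PySem.Str.lstrip l) "#" then rest else l :: rest
      | [] => []
    let ls3 := aSkipBlank ls2
    let out := aTakeOut ls3
    PySem.Str.strip (PySem.Str.join " " out)

-- ===== PORT B =====
-- B's for-loop body: accumulate the current run of non-blank lines, flush it at a blank line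
def bStep (st : List (List String) × List String) (line : String) : List (List String) × List String :=
  if PySem.Str.strip line ≠ "" then (st.1, st.2 ++ [line])
  else if st.2 ≠ [] then (st.1 ++ [st.2], []) else st

def first_paragraph_after_title_py_alt (text : String) : String :=
  let st := (PySem.Str.splitlines text).foldl bStep ([], [])
  let blocks := if st.2 ≠ [] then st.1 ++ [st.2] else st.1
  match blocks with
  | [] => ""
  | first :: restBlocks =>
    let para :=
      if PySem.Str.startswith (PySem.Str.lstrip first.headI) "#" then
        let body := first.tail
        if body ≠ [] then body
        else match restBlocks with
          | b2 :: _ => b2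
          | [] => []
      else first
    PySem.Str.strip (PySem.Str.join " " (para.map PySem.Str.strip))

-- ===== PRECONDITION & SPEC =====
def Spec_first_paragraph_after_title_py (text : String) (out : String) : Prop := out = first_paragraph_after_title_py_alt text
instance (text : String) (out : String) : Decidable (Spec_first_paragraph_after_title_py text out) := by unfold Spec_first_paragraph_after_title_py; infer_instance

-- ===== CLAIM (what is proved, stated in full; the proofs are below) =====
def Claim_equal_first_paragraph_after_title_py : Prop := ∀ (text : String), Dom_first_paragraph_after_title_py text → Spec_first_paragraph_after_title_py text (first_paragraph_after_title_py text)

-- ===== LEMMAS AND PROOFS =====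

-- reference form of B's grouping: blocksAux cur ls = the blocks of ls with pending run cur
def blocksAux (cur : List String) : List String → List (List String)
  | [] => if cur = [] then [] else [cur]
  | l :: rest =>
    if PySem.Str.strip l = "" then
      if cur = [] then blocksAux [] rest else cur :: blocksAux [] rest
    else blocksAux (cur ++ [l]) rest

-- raw prefix of non-blank lines
def rawTake : List String → List String
  | [] => []
  | l :: rest => if PySem.Str.strip l = "" then [] else l :: rawTake rest

-- the lines after the first block ends (past its terminating blank line)
def afterBlk : List String → List String
  | [] => []
  | l :: rest => if PySem.Str.strip l = "" then rest else afterBlk rest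

theorem foldl_bStep (ls : List String) : ∀ (bs : List (List String)) (cur : List String),
    (let st := ls.foldl bStep (bs, cur);
     if st.2 ≠ [] then st.1 ++ [st.2] else st.1) = bs ++ blocksAux cur ls := by
  induction ls with
  | nil => intro bs cur; by_cases h : cur = [] <;> simp [blocksAux, h]
  | cons l rest ih =>
    intro bs cur
    by_cases h : PySem.Str.strip l = ""
    · by_cases hc : cur = [] <;>
        simp [List.foldl_cons, bStep, h, hc, blocksAux, ih]
    · simp [List.foldl_cons, bStep, h, blocksAux, ih]

theorem blocksAux_ne (ls : List String) : ∀ (cur : List String), cur ≠ [] →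
    blocksAux cur ls = (cur ++ rawTake ls) :: blocksAux [] (afterBlk ls) := by
  induction ls with
  | nil => intro cur hc; simp [blocksAux, rawTake, afterBlk, hc]
  | cons l rest ih =>
    intro cur hc
    by_cases h : PySem.Str.strip l = ""
    · simp [blocksAux, rawTake, afterBlk, h, hc]
    · simp [blocksAux, rawTake, afterBlk, h, ih (cur ++ [l]) (by simp)]

theorem aTakeOut_eq (ls : List String) : aTakeOut ls = (rawTake ls).map PySem.Str.strip := by
  induction ls with
  | nil => simp [aTakeOut, rawTake]
  | cons l rest ih =>
    by_cases h : PySem.Str.strip l = "" <;> simp [aTakeOut, rawTake, h, ih]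

theorem aTakeOut_skip (ls : List String) :
    aTakeOut (aSkipBlank ls) = (blocksAux [] ls).headI.map PySem.Str.strip := by
  induction ls with
  | nil => simp [aSkipBlank, blocksAux, aTakeOut]; rfl
  | cons l rest ih =>
    by_cases h : PySem.Str.strip l = ""
    · simpa [aSkipBlank, blocksAux, h] using ih
    · simp [aSkipBlank, blocksAux, h, blocksAux_ne rest [l] (by simp),
        aTakeOut_eq, rawTake]

-- structure of the first block versus A's skip
theorem blocks_struct (ls : List String) :
    (aSkipBlank ls = [] ∧ blocksAux [] ls = []) ∨
    (∃ l rest, aSkipBlank ls = l :: rest ∧ PySem.Str.strip l ≠ "" ∧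
      blocksAux [] ls = (l :: rawTake rest) :: blocksAux [] (afterBlk rest)) := by
  induction ls with
  | nil => left; simp [aSkipBlank, blocksAux]
  | cons l rest ih =>
    by_cases h : PySem.Str.strip l = ""
    · simpa [aSkipBlank, blocksAux, h] using ih
    · right
      exact ⟨l, rest, by simp [aSkipBlank, h], h,
        by simp [blocksAux, h, blocksAux_ne rest [l] (by simp)]⟩

theorem headI_afterBlk (rest : List String) (h : rawTake rest = []) :
    (blocksAux [] rest).headI = (blocksAux [] (afterBlk rest)).headI := by
  cases rest with
  | nil => simp [afterBlk]
  | cons x r =>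
    by_cases hx : PySem.Str.strip x = ""
    · simp [blocksAux, afterBlk, hx]
    · simp [rawTake, hx] at h

-- ===== VERDICT (by name: the statement is the Claim_ definition above) =====
theorem first_paragraph_after_title_py_spec : Claim_equal_first_paragraph_after_title_py := by
  intro text _
  unfold Spec_first_paragraph_after_title_py
  unfold first_paragraph_after_title_py first_paragraph_after_title_py_alt
  dsimp only
  set lines := PySem.Str.splitlines text with hlines
  rw [foldl_bStep lines [] []]
  simp only [List.nil_append]
  rcases blocks_struct lines with ⟨hs, hb⟩ | ⟨l, rest, hs, hnb, hb⟩
  · -- no non-blank line at all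
    rw [hb, hs]
    by_cases hl : lines = []
    · simp [hl]
    · simp only [if_neg hl]
      simp [aSkipBlank, aTakeOut]
      decide
  · have hlines_ne : lines ≠ [] := by
      intro h; rw [h] at hs; simp [aSkipBlank] at hs
    rw [hb]
    simp only [if_neg (by simp [hlines_ne] : ¬ lines = []), hs]
    simp only [List.headI]
    by_cases ht : PySem.Str.startswith (PySem.Str.lstrip l) "#" = true
    · -- title line present
      simp only [ht, if_pos, List.tail_cons]
      by_cases hbody : rawTake rest = []
      · -- title alone in its block: A skips to the next block
        simp only [hbody]
        rw [aTakeOut_skip rest, headI_afterBlk rest hbody]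
        cases hrb : blocksAux [] (afterBlk rest) with
        | nil => simp; rfl
        | cons b2 bs => simp
      · -- content glued right after the title, no blank separator
        cases rest with
        | nil => exact absurd rfl hbody
        | cons x r =>
          by_cases hx : PySem.Str.strip x = ""
          · simp [rawTake, hx] at hbody
          · simp only [if_pos hbody]
            rw [aTakeOut_skip (x :: r)]
            simp [blocksAux, hx, blocksAux_ne r [x] (by simp), rawTake]
    · -- no title: the whole first block is the paragraph
      simp only [ht, if_neg, Bool.false_eq_true, not_false_iff]
      have : aSkipBlank (l :: rest) = l :: rest := by simp [aSkipBlank, hnb]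
      simp [this, aTakeOut_eq, rawTake, hnb]
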